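-- pv_equiv track=rewrite | github.com/theBappy/python-fundamentals-with-projects | password_projects/meter_pass.py | sequentialNumbers
-- ===== SOURCE A (Python) =====
-- def sequentialNumbers(password):
--     sequenceThreeDigitNumbers = [
--         "012", "123", "234", "345", "456", "567", "678", "789", "890"
--     ]
--     countNumbers = 0
--     for i in range(len(password) - 2):
--         numbers = password[i:i + 3]
--         if numbers in sequenceThreeDigitNumbers:
--             countNumbers += 1
--     return countNumbers * (-3)
-- ===== SOURCE B (Python) =====
-- def sequentialNumbers(password):
--     patterns = ("012", "123", "234", "345", "456", "567", "678", "789", "890")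
--     return sum(password.count(s) for s in patterns) * (-3)
-- ===== Notes on version B (the rewrite author's own statement) =====
-- stated objective: idiomatic
-- what changed: Iterates over the nine patterns and sums str.count occurrences instead of sliding an index window over the password; correct because the patterns are distinct, all length 3, and none self-overlaps.
import Mathlib
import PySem

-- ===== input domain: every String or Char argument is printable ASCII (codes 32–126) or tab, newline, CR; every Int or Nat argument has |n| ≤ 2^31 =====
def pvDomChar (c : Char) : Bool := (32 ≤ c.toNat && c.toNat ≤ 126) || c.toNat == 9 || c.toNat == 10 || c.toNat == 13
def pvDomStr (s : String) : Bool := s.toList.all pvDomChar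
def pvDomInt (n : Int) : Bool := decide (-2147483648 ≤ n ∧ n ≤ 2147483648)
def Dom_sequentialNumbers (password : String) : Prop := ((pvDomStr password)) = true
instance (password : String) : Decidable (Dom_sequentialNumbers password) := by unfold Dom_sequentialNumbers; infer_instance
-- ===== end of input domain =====

-- B sums str.count over the nine patterns instead of sliding an index window over the password;
-- equal because the patterns are distinct, all of length 3, and none self-overlaps (idiomatic decomposition).

-- ===== PORT A =====
def sequentialNumbers (password : String) : Int :=
  let sequenceThreeDigitNumbers : List String :=
    ["012", "123", "234", "345", "456", "567", "678", "789", "890"]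
  let countNumbers : Int :=
    (PySem.List.pyRange 0 (PySem.Str.len password - 2) 1).foldl
      (fun countNumbers i =>
        let numbers := PySem.Str.slice password (some i) (some (i + 3))
        if sequenceThreeDigitNumbers.contains numbers then countNumbers + 1 else countNumbers)
      0
  countNumbers * (-3)

-- ===== PORT B =====
def sequentialNumbers_alt (password : String) : Int :=
  let patterns : List String :=
    ["012", "123", "234", "345", "456", "567", "678", "789", "890"]
  (patterns.map (fun s => (PySem.Str.count password s : Int))).sum * (-3)

-- ===== PRECONDITION & SPEC =====
def Spec_sequentialNumbers (password : String) (out : Int) : Prop := out = sequentialNumbers_alt password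
instance (password : String) (out : Int) : Decidable (Spec_sequentialNumbers password out) := by unfold Spec_sequentialNumbers; infer_instance

-- ===== CLAIM (what is proved, stated in full; the proofs are below) =====
def Claim_equal_sequentialNumbers : Prop := ∀ (password : String), Dom_sequentialNumbers password → Spec_sequentialNumbers password (sequentialNumbers password)

-- ===== LEMMAS AND PROOFS =====

-- the nine patterns, on the List Char side
def pvP : List (List Char) :=
  [['0','1','2'], ['1','2','3'], ['2','3','4'], ['3','4','5'], ['4','5','6'],
   ['5','6','7'], ['6','7','8'], ['7','8','9'], ['8','9','0']]

-- number of suffixes of s starting with p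
def pvOcc (p : List Char) : List Char → Nat
  | [] => 0
  | x :: t => (if p <+: (x :: t) then 1 else 0) + pvOcc p t

-- number of suffixes of s whose first three chars form a pattern
def pvCnt : List Char → Nat
  | [] => 0
  | x :: t => (if pvP.contains ((x :: t).take 3) then 1 else 0) + pvCnt t

lemma pvP_len3 : ∀ p ∈ pvP, p.length = 3 := by decide

lemma pvCnt_short {s : List Char} (h : s.length ≤ 2) : pvCnt s = 0 := by
  match s, h with
  | [], _ => rfl
  | [a], _ =>
    have h1 : [a] ∉ pvP := fun hm => by have := pvP_len3 _ hm; simp at this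
    simp [pvCnt, h1]
  | [a, b], _ =>
    have h1 : [a, b] ∉ pvP := fun hm => by have := pvP_len3 _ hm; simp at this
    have h2 : [b] ∉ pvP := fun hm => by have := pvP_len3 _ hm; simp at this
    simp [pvCnt, h1, h2]

-- Python's non-overlapping count equals the number of matching suffixes, for a
-- 3-pattern whose last two characters differ from its first (no self-overlap).
lemma pvCount_go {a b c : Char} (hab : a ≠ b) (hac : a ≠ c) :
    ∀ (fuel : Nat) (s : List Char) (acc : Nat), s.length ≤ fuel →
      PySem.Chars.count.go [a, b, c] fuel s acc = acc + pvOcc [a, b, c] s := by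
  intro fuel
  induction fuel with
  | zero =>
    intro s acc h
    have h0 : s = [] := List.length_eq_zero_iff.mp (Nat.le_zero.mp h)
    subst h0
    simp [PySem.Chars.count.go, pvOcc]
  | succ n ih =>
    intro s acc h
    match s with
    | [] => simp [PySem.Chars.count.go, pvOcc]
    | x :: t =>
      rw [PySem.Chars.count.go]
      by_cases hp : [a, b, c] <+: (x :: t)
      · have hpre : [a, b, c].isPrefixOf (x :: t) = true := by
          rw [List.isPrefixOf_iff_prefix]; exact hp
        obtain ⟨u, hu⟩ := hp
        simp only [List.cons_append, List.nil_append, List.cons.injEq] at hu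
        obtain ⟨rfl, hu⟩ := hu
        subst hu
        · simp only [hpre, if_true]
          have hlen : u.length ≤ n := by simp at h; omega
          rw [show List.drop (List.length [a,b,c]) (a :: b :: c :: u) = u by simp]
          rw [ih u (acc + 1) hlen]
          have h1 : ¬ ([a, b, c] <+: (b :: c :: u)) := by
            intro hx; exact hab (List.cons_prefix_cons.mp hx).1
          have h2 : ¬ ([a, b, c] <+: (c :: u)) := by
            intro hx; exact hac (List.cons_prefix_cons.mp hx).1
          have h0 : [a, b, c] <+: (a :: b :: c :: u) := ⟨u, rfl⟩
          simp [pvOcc, h0, h1, h2]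
          omega
      · have hpre : [a, b, c].isPrefixOf (x :: t) = false := by
          rw [Bool.eq_false_iff]
          intro hx; exact hp (List.isPrefixOf_iff_prefix.mp hx)
        simp only [hpre, Bool.false_eq_true, if_false]
        have hlen : t.length ≤ n := by simp at h; omega
        rw [ih t acc hlen]
        simp [pvOcc, hp]

lemma pvCount_eq_occ {a b c : Char} (hab : a ≠ b) (hac : a ≠ c) (s : List Char) :
    PySem.Chars.count s [a, b, c] = pvOcc [a, b, c] s := by
  rw [PySem.Chars.count]
  simp only [List.isEmpty_iff, reduceCtorEq, if_false]
  rw [pvCount_go hab hac s.length s 0 le_rfl, Nat.zero_add]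

-- sum of prefix indicators over a nodup list of 3-patterns = membership of the 3-window
lemma pvIndSum (Q : List (List Char)) (s : List Char)
    (h3 : ∀ p ∈ Q, p.length = 3) (hn : Q.Nodup) :
    (Q.map (fun p => if p <+: s then 1 else 0)).sum = (if s.take 3 ∈ Q then 1 else 0) := by
  induction Q with
  | nil => simp
  | cons p Q' ih =>
    have hp3 : p.length = 3 := h3 p List.mem_cons_self
    have ih' := ih (fun q hq => h3 q (List.mem_cons_of_mem _ hq)) hn.of_cons
    by_cases hp : p <+: s
    · have he : s.take 3 = p := by
        rw [List.prefix_iff_eq_take, hp3] at hp; exact hp.symm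
      have hnm : p ∉ Q' := (List.nodup_cons.mp hn).1
      simp [he, ih', hnm, hp]
    · have hne : s.take 3 ≠ p := by
        intro he
        exact hp (by rw [List.prefix_iff_eq_take, hp3, he])
      simp [hp, ih', hne]

lemma pvP_nodup : pvP.Nodup := by decide

-- sum of occurrence counts over the nine patterns = windowed count
lemma pvSum_eq_cnt (s : List Char) :
    (pvP.map (fun p => pvOcc p s)).sum = pvCnt s := by
  induction s with
  | nil => simp [pvP, pvOcc, pvCnt]
  | cons x t ih =>
    have hstep : (pvP.map (fun p => pvOcc p (x :: t))).sum
        = (pvP.map (fun p => if p <+: (x :: t) then 1 else 0)).sum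
          + (pvP.map (fun p => pvOcc p t)).sum := by
      rw [← List.sum_map_add]
      apply congrArg
      apply List.map_congr_left
      intro p hp
      cases p with
      | nil => exact absurd (pvP_len3 _ hp) (by simp)
      | cons y q => rfl
    rw [hstep, pvIndSum pvP (x :: t) pvP_len3 pvP_nodup, ih]
    rw [pvCnt]
    congr 1
    simp [List.contains_eq_mem]

-- A's windowed count over range(len - 2) = pvCnt
lemma pvRange_eq_cnt (s : List Char) :
    List.countP (fun k => pvP.contains ((s.drop k).take 3)) (List.range (s.length - 2))
      = pvCnt s := by
  induction s with
  | nil => simp [pvCnt]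
  | cons x t ih =>
    by_cases hlen : 2 ≤ t.length
    · have h2 : (x :: t).length - 2 = (t.length - 2) + 1 := by simp; omega
      rw [h2, List.range_succ_eq_map, List.countP_cons, List.countP_map]
      have hmap : List.countP ((fun k => pvP.contains (((x :: t).drop k).take 3)) ∘ Nat.succ)
          (List.range (t.length - 2))
          = List.countP (fun k => pvP.contains ((t.drop k).take 3)) (List.range (t.length - 2)) := by
        apply List.countP_congr
        intro k _
        simp [Function.comp]
      rw [hmap, ih, pvCnt]
      simp [List.drop_zero, Nat.add_comm]
    · have h0 : (x :: t).length - 2 = 0 := by simp; omega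
      rw [h0]
      have hc : pvCnt (x :: t) = 0 := pvCnt_short (by simp; omega)
      simp [hc]

-- bridge: membership of a String in the nine literal strings, on the list side
lemma pvContains_str (w : String) :
    (["012", "123", "234", "345", "456", "567", "678", "789", "890"] : List String).contains w
      = pvP.contains w.toList := by
  simp only [List.contains_eq_mem]
  rw [decide_eq_decide]
  simp only [pvP, List.mem_cons, List.not_mem_nil, or_false, ← String.toList_inj]
  rfl

-- ===== VERDICT (by name: the statement is the Claim_ definition above) =====
theorem sequentialNumbers_spec : Claim_equal_sequentialNumbers := by
  intro password _
  unfold Spec_sequentialNumbers sequentialNumbers sequentialNumbers_alt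
  simp only []
  set s : List Char := password.toList with hs
  -- A side: fold → countP over range → pvCnt
  have hA : (PySem.List.pyRange 0 (PySem.Str.len password - 2) 1).foldl
      (fun countNumbers i =>
        if (["012", "123", "234", "345", "456", "567", "678", "789", "890"] : List String).contains
            (PySem.Str.slice password (some i) (some (i + 3))) then countNumbers + 1
        else countNumbers) (0 : Int) = (pvCnt s : Int) := by
    rw [PySem.Str.len_eq, PySem.List.pyRange_zero, List.foldl_map,
      PySem.List.foldl_if_add_one
        (fun k : Nat => (["012", "123", "234", "345", "456", "567", "678", "789", "890"] :
            List String).contains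
          (PySem.Str.slice password (some (k : Int)) (some ((k : Int) + 3))))
        (List.range ((password.toList.length : Int) - 2).toNat) 0]
    have htn : ((password.toList.length : Int) - 2).toNat = s.length - 2 := by
      rw [hs]; omega
    rw [htn, zero_add]
    have hcp : List.countP
        (fun k : Nat => (["012", "123", "234", "345", "456", "567", "678", "789", "890"] :
            List String).contains
          (PySem.Str.slice password (some (k : Int)) (some ((k : Int) + 3))))
        (List.range (s.length - 2))
        = List.countP (fun k => pvP.contains ((s.drop k).take 3)) (List.range (s.length - 2)) := by
      apply List.countP_congr
      intro k _
      rw [pvContains_str]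
      have hsl : (PySem.Str.slice password (some (k : Int)) (some ((k : Int) + 3))).toList
          = (s.drop k).take 3 := by
        rw [PySem.Str.toList_slice]
        have h3 : ((k : Int) + 3) = ((k : Int) + ((3 : Nat) : Int)) := by norm_num
        rw [h3]
        exact PySem.List.slice_natCast_add password.toList k 3
      rw [hsl]
    rw [hcp, pvRange_eq_cnt]
  rw [hA]
  -- B side: nine counts → nine occurrence counts → pvCnt
  have hB : ((["012", "123", "234", "345", "456", "567", "678", "789", "890"] : List String).map
      (fun p => (PySem.Str.count password p : Int))).sum = (pvCnt s : Int) := by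
    simp only [List.map_cons, List.map_nil, List.sum_cons, List.sum_nil, PySem.Str.count_eq, ← hs]
    rw [show ("012" : String).toList = ['0','1','2'] from rfl,
        show ("123" : String).toList = ['1','2','3'] from rfl,
        show ("234" : String).toList = ['2','3','4'] from rfl,
        show ("345" : String).toList = ['3','4','5'] from rfl,
        show ("456" : String).toList = ['4','5','6'] from rfl,
        show ("567" : String).toList = ['5','6','7'] from rfl,
        show ("678" : String).toList = ['6','7','8'] from rfl,
        show ("789" : String).toList = ['7','8','9'] from rfl,
        show ("890" : String).toList = ['8','9','0'] from rfl]
    rw [pvCount_eq_occ (by decide) (by decide) s, pvCount_eq_occ (by decide) (by decide) s,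
        pvCount_eq_occ (by decide) (by decide) s, pvCount_eq_occ (by decide) (by decide) s,
        pvCount_eq_occ (by decide) (by decide) s, pvCount_eq_occ (by decide) (by decide) s,
        pvCount_eq_occ (by decide) (by decide) s, pvCount_eq_occ (by decide) (by decide) s,
        pvCount_eq_occ (by decide) (by decide) s]
    rw [← pvSum_eq_cnt s]
    simp only [pvP, List.map_cons, List.map_nil, List.sum_cons, List.sum_nil]
    push_cast
    ring
  rw [hB]
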